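-- pv_equiv track=rewrite | github.com/ChanWhanPark/Algorithm | programmers/weekly_challenge/week_1.py | solution
-- ===== SOURCE A (Python) =====
-- def solution(price, money, count):
--     pay = 0
--     for i in range(1, count + 1):
--         pay += (price * i)
--
--     money -= pay
--     if money >= 0:
--         return 0
--     else:
--         return abs(money)
-- ===== SOURCE B (Python) =====
-- def solution(price, money, count):
--     n = max(count, 0)
--     total = price * n * (n + 1) // 2
--     return max(total - money, 0)
-- ===== Notes on version B (the rewrite author's own statement) =====
-- stated objective: faster
-- what changed: Replaces the O(count) summation loop by the arithmetic-series closed form price*n*(n+1)//2 and expresses the result as max(total-money, 0).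
import Mathlib
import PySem

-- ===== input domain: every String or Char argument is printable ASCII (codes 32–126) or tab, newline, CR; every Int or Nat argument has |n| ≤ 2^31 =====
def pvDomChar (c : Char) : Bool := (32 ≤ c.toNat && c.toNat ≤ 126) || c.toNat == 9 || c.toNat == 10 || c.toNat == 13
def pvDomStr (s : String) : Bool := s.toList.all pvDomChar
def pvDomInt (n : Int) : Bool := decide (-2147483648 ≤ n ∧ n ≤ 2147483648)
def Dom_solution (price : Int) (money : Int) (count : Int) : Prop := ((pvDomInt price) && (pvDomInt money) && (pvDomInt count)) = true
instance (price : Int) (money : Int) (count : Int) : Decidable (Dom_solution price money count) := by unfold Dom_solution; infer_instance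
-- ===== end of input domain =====

-- B replaces A's O(count) summation loop by the closed form price*n*(n+1)//2 (O(1)).


-- ===== PORT A =====
def solution (price : Int) (money : Int) (count : Int) : Int :=
  let pay := (PySem.List.pyRange 1 (count + 1) 1).foldl (fun pay i => pay + price * i) 0
  let money := money - pay
  if money ≥ 0 then 0 else |money|

-- ===== PORT B =====
def solution_alt (price : Int) (money : Int) (count : Int) : Int :=
  let n := max count 0
  let total := PySem.Int.floordiv (price * n * (n + 1)) 2
  max (total - money) 0

-- ===== PRECONDITION & SPEC =====
def Spec_solution (price : Int) (money : Int) (count : Int) (out : Int) : Prop := out = solution_alt price money count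
instance (price : Int) (money : Int) (count : Int) (out : Int) : Decidable (Spec_solution price money count out) := by unfold Spec_solution; infer_instance

-- ===== CLAIM (what is proved, stated in full; the proofs are below) =====
def Claim_equal_solution : Prop := ∀ (price : Int) (money : Int) (count : Int), Dom_solution price money count → Spec_solution price money count (solution price money count)

-- ===== LEMMAS AND PROOFS =====

-- the loop's sum, doubled, is the closed-form numerator
theorem pv_sum_loop (price : Int) (n : Nat) :
    2 * ((PySem.List.pyRange 1 ((n : Int) + 1) 1).foldl (fun pay i => pay + price * i) 0)
      = price * (n : Int) * ((n : Int) + 1) := by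
  induction n with
  | zero => simp [PySem.List.pyRange_one_eq_nil]
  | succ k ih =>
      have h : PySem.List.pyRange 1 ((k : Int) + 1 + 1) 1
          = PySem.List.pyRange 1 ((k : Int) + 1) 1 ++ [(k : Int) + 1] := by
        exact PySem.List.pyRange_one_succ_right (by omega)
      push_cast
      rw [h, List.foldl_append]
      simp only [List.foldl]
      push_cast at ih
      ring_nf
      ring_nf at ih
      omega

-- ===== VERDICT (by name: the statement is the Claim_ definition above) =====
theorem solution_spec : Claim_equal_solution := by
  intro price money count _
  simp only [Spec_solution, solution, solution_alt]
  by_cases hc : 0 ≤ count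
  · obtain ⟨n, rfl⟩ := Int.eq_ofNat_of_zero_le hc
    have hsum := pv_sum_loop price n
    have hmax : max (n : Int) 0 = (n : Int) := by omega
    rw [hmax]
    set S := (PySem.List.pyRange 1 ((n : Int) + 1) 1).foldl (fun pay i => pay + price * i) 0 with hS
    have hfd : PySem.Int.floordiv (price * (n : Int) * ((n : Int) + 1)) 2 = S := by
      rw [← hsum, PySem.Int.floordiv_eq_ediv_of_pos (by omega)]
      omega
    rw [hfd]
    by_cases hm : money - S ≥ 0
    · simp only [if_pos hm]; omega
    · simp only [if_neg hm]
      rw [abs_of_neg (by omega)]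
      omega
  · have hnil : PySem.List.pyRange 1 (count + 1) 1 = [] :=
      PySem.List.pyRange_one_eq_nil (by omega)
    have hmax : max count 0 = 0 := by omega
    rw [hnil, hmax]
    simp only [List.foldl, mul_zero, zero_mul]
    have : PySem.Int.floordiv (0 : Int) 2 = 0 := by
      rw [PySem.Int.floordiv_eq_ediv_of_pos (by omega)]; omega
    rw [this]
    by_cases hm : money - 0 ≥ 0
    · simp only [if_pos hm]; omega
    · simp only [if_neg hm]
      rw [abs_of_neg (by omega)]
      omega
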